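-- pv_equiv track=rewrite | github.com/xchem/xchem-align | src/pdbdepo/pdb_deposition.py | collect_entity_values
-- ===== SOURCE A (Python) =====
-- def collect_entity_values(tags, values, exclude_pairs=[]):
--     rows = []
--     if values:
--         d = None
--         for i, value in enumerate(values):
--             if i % len(tags) == 0:
--                 if d:
--                     add_row_if_not_excluded(d, rows, exclude_pairs)
--                 d = {}
--             tag = tags[i % len(tags)]
--             d[tag] = value
--         add_row_if_not_excluded(d, rows, exclude_pairs)
--     return rows
--
-- def add_row_if_not_excluded(d, rows, exclude_pairs):
--     is_excluded = False
--     for exclude in exclude_pairs: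
--         if d.get(exclude[0]) == exclude[1]:
--             is_excluded = True
--     if not is_excluded:
--         rows.append(d)
-- ===== SOURCE B (Python) =====
-- def collect_entity_values(tags, values, exclude_pairs=[]):
--     if not values:
--         return []
--     n = len(tags)
--     rows = []
--     for i in range(0, len(values), n):
--         d = dict(zip(tags, values[i:i + n]))
--         if not any(d.get(e[0]) == e[1] for e in exclude_pairs):
--             rows.append(d)
--     return rows
-- ===== Notes on version B (the rewrite author's own statement) =====
-- stated objective: idiomatic
-- what changed: Replaces the incremental enumerate loop with its carried dict sentinel, i%len(tags) boundary trigger and flush helper by an explicit chunked pass: slice values[i:i+len(tags)] per chunk, build the row with dict(zip(tags, chunk)), and inline the exclusion test as any(); Pre_ excludes only inputs where A raises (non-empty values with empty tags: ZeroDivisionError, or an exclude pair shorter than 2 entries: IndexError).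
import Mathlib
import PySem

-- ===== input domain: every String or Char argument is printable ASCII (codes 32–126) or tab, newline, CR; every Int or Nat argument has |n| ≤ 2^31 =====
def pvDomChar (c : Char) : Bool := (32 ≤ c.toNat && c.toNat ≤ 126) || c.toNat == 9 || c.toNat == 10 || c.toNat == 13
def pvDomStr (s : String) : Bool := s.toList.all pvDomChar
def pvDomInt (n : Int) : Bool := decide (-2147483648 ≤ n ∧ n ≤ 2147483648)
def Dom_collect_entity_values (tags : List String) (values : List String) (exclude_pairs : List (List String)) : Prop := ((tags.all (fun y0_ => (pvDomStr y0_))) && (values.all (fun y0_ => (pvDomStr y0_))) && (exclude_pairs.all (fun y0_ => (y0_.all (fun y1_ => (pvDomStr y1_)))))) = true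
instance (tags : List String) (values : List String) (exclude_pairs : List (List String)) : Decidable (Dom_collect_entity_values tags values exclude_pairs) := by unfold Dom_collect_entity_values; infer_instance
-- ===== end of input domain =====

-- B replaces A's incremental sentinel/modulo loop by explicit slice-chunking with dict(zip(…)) and an inlined any() exclusion test (idiomatic; same cost).

-- ===== PORT A =====
-- add_row_if_not_excluded; exclude[0]/exclude[1] are ported with List.getD (total stand-in):
-- Pre_ guarantees every exclude pair has length ≥ 2, exactly where Python does not raise IndexError.
def pvAddRow (d : PySem.Dict String String) (rows : List (List (String × String))) (exclude_pairs : List (List String)) : List (List (String × String)) :=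
  let isExcluded := exclude_pairs.foldl
    (fun acc e => if d.get? (e.getD 0 "") = some (e.getD 1 "") then true else acc) false
  if isExcluded then rows else rows ++ [d.items]

-- the body of A's `for i, value in enumerate(values)` loop; state = (rows, d) with d : Option dict (the None sentinel).
-- `i % len(tags)` is PySem.Int.mod; Pre_ keeps tags ≠ [] when values ≠ [], exactly where Python does not raise ZeroDivisionError,
-- and there `tags[i % len(tags)]` is in range, so pyGetD / Option.getD are exact stand-ins.
def pvStepA (tags : List String) (exclude_pairs : List (List String))
    (st : List (List (String × String)) × Option (PySem.Dict String String)) (iv : Int × String) :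
    List (List (String × String)) × Option (PySem.Dict String String) :=
  let m := PySem.Int.mod iv.1 (tags.length : Int)
  let (rows, d) :=
    if m = 0 then
      match st.2 with
      | some dd => (if dd.items ≠ [] then pvAddRow dd st.1 exclude_pairs else st.1, PySem.Dict.empty)
      | none => (st.1, PySem.Dict.empty)
    else (st.1, st.2.getD PySem.Dict.empty)
  let tag := PySem.List.pyGetD tags m ""
  (rows, some (d.insert tag iv.2))

def collect_entity_values (tags : List String) (values : List String) (exclude_pairs : List (List String)) : List (List (String × String)) :=
  if values = [] then []
  else
    let st := (PySem.List.enumerate values).foldl (pvStepA tags exclude_pairs) ([], none)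
    pvAddRow (st.2.getD PySem.Dict.empty) st.1 exclude_pairs

-- ===== PORT B =====
-- body of B's `for i in range(0, len(values), len(tags))` loop: slice the chunk, dict(zip(tags, chunk)), append if not any(...).
def pvStepB (tags : List String) (values : List String) (exclude_pairs : List (List String))
    (rows : List (List (String × String))) (i : Int) : List (List (String × String)) :=
  let d := PySem.Dict.ofList (tags.zip (PySem.List.slice values (some i) (some (i + (tags.length : Int)))))
  if exclude_pairs.any (fun e => d.get? (e.getD 0 "") = some (e.getD 1 "")) then rows
  else rows ++ [d.items]

def collect_entity_values_alt (tags : List String) (values : List String) (exclude_pairs : List (List String)) : List (List (String × String)) :=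
  if values = [] then []
  else
    (PySem.List.pyRange 0 (values.length : Int) (tags.length : Int)).foldl
      (pvStepB tags values exclude_pairs) []

-- ===== PRECONDITION & SPEC =====
-- Pre_ excludes exactly the inputs where A raises: non-empty values with empty tags (ZeroDivisionError on i % len(tags)),
-- and non-empty values with some exclude pair shorter than 2 entries (IndexError on exclude[0]/exclude[1]).
def Pre_collect_entity_values (tags : List String) (values : List String) (exclude_pairs : List (List String)) : Prop :=
  values = [] ∨ (tags ≠ [] ∧ ∀ e ∈ exclude_pairs, 2 ≤ e.length)
instance (tags : List String) (values : List String) (exclude_pairs : List (List String)) : Decidable (Pre_collect_entity_values tags values exclude_pairs) := by unfold Pre_collect_entity_values; infer_instance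

def pvWitness_collect_entity_values : List String × List String × List (List String) :=
  (["a", "b"], ["1", "2", "3"], [["a", "9"]])

def Spec_collect_entity_values (tags : List String) (values : List String) (exclude_pairs : List (List String)) (out : List (List (String × String))) : Prop := out = collect_entity_values_alt tags values exclude_pairs
instance (tags : List String) (values : List String) (exclude_pairs : List (List String)) (out : List (List (String × String))) : Decidable (Spec_collect_entity_values tags values exclude_pairs out) := by unfold Spec_collect_entity_values; infer_instance

-- ===== CLAIM (what is proved, stated in full; the proofs are below) =====
def Claim_equal_collect_entity_values : Prop := ∀ (tags : List String) (values : List String) (exclude_pairs : List (List String)), Dom_collect_entity_values tags values exclude_pairs → Pre_collect_entity_values tags values exclude_pairs → Spec_collect_entity_values tags values exclude_pairs (collect_entity_values tags values exclude_pairs)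

-- ===== LEMMAS AND PROOFS =====

-- common reference shape: the rows produced chunk by chunk (fuel = an upper bound on values.length)
def pvSpecRows (tags : List String) (exclude_pairs : List (List String)) : Nat → List String → List (List (String × String))
  | _, [] => []
  | 0, _ :: _ => []
  | f + 1, v :: vs =>
      let d := PySem.Dict.ofList (tags.zip ((v :: vs).take tags.length))
      (if exclude_pairs.any (fun e => d.get? (e.getD 0 "") = some (e.getD 1 "")) then [] else [d.items])
        ++ pvSpecRows tags exclude_pairs f ((v :: vs).drop tags.length)

-- flushing the pending dict, as A's boundary does
def pvFlush (exclude_pairs : List (List String)) (rows : List (List (String × String)))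
    (dopt : Option (PySem.Dict String String)) : List (List (String × String)) :=
  match dopt with
  | none => rows
  | some dd => if dd.items ≠ [] then pvAddRow dd rows exclude_pairs else rows

theorem pvSpecRows_nil (tags : List String) (ex : List (List String)) (f : Nat) :
    pvSpecRows tags ex f [] = [] := by cases f <;> rfl

theorem pv_foldl_or (d : PySem.Dict String String) (ex : List (List String)) (b : Bool) :
    ex.foldl (fun acc e => if d.get? (e.getD 0 "") = some (e.getD 1 "") then true else acc) b
      = (b || ex.any (fun e => d.get? (e.getD 0 "") = some (e.getD 1 ""))) := by
  induction ex generalizing b with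
  | nil => simp
  | cons e t ih =>
      simp only [List.foldl_cons, List.any_cons, ih]
      by_cases h : d.get? (e.getD 0 "") = some (e.getD 1 "")
      · cases b <;> simp [h]
      · cases b <;> simp [h]

theorem pvAddRow_eq (d : PySem.Dict String String) (rows : List (List (String × String))) (ex : List (List String)) :
    pvAddRow d rows ex
      = rows ++ (if ex.any (fun e => d.get? (e.getD 0 "") = some (e.getD 1 "")) then [] else [d.items]) := by
  simp only [pvAddRow, pv_foldl_or, Bool.false_or]
  split <;> simp_all

theorem pv_insert_items_ne_nil (d : PySem.Dict String String) (k v : String) :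
    (d.insert k v).items ≠ [] := by
  obtain ⟨items⟩ := d
  cases items with
  | nil => simp [PySem.Dict.insert, PySem.Dict.contains]
  | cons p t =>
      simp only [PySem.Dict.insert]
      split <;> simp

theorem pv_foldl_insert_ne_nil (ps : List (String × String)) (d : PySem.Dict String String)
    (h : d.items ≠ []) : (ps.foldl (fun acc p => acc.insert p.1 p.2) d).items ≠ [] := by
  induction ps generalizing d with
  | nil => exact h
  | cons p t ih => exact ih _ (pv_insert_items_ne_nil _ _ _)

theorem pv_ofList_zip_ne_nil (tags c : List String) (ht : tags ≠ []) (hc : c ≠ []) :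
    (PySem.Dict.ofList (tags.zip c)).items ≠ [] := by
  obtain ⟨t0, tt, rfl⟩ := List.exists_cons_of_ne_nil ht
  obtain ⟨c0, ct, rfl⟩ := List.exists_cons_of_ne_nil hc
  simp only [PySem.Dict.ofList, PySem.Dict.update, List.zip_cons_cons, List.foldl_cons]
  exact pv_foldl_insert_ne_nil _ _ (pv_insert_items_ne_nil _ _ _)

-- A's loop over the tail of one chunk: no boundary fires, values are inserted under tags[j], tags[j+1], …
theorem pvA_inner (tags : List String) (ex : List (List String)) (c : List String) :
    ∀ (s j : Nat), tags.length ∣ s → 0 < j → j + c.length ≤ tags.length →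
    ∀ (rows : List (List (String × String))) (d : PySem.Dict String String),
    (PySem.List.enumerate c ((s + j : Nat) : Int)).foldl (pvStepA tags ex) (rows, some d)
      = (rows, some (((tags.drop j).zip c).foldl (fun acc p => acc.insert p.1 p.2) d)) := by
  induction c with
  | nil => intro s j _ _ _ rows d; simp [PySem.List.enumerate]
  | cons x ct ih =>
      intro s j hdvd hj hjc rows d
      obtain ⟨q, rfl⟩ := hdvd
      have hjlt : j < tags.length := by simp at hjc; omega
      have hmod : PySem.Int.mod ((tags.length * q + j : Nat) : Int) (tags.length : Int) = (j : Int) := by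
        rw [PySem.Int.mod_natCast]
        congr 1
        rw [Nat.mul_add_mod]
        exact Nat.mod_eq_of_lt hjlt
      rw [PySem.List.enumerate_cons, List.foldl_cons]
      have hstep : pvStepA tags ex (rows, some d) (((tags.length * q + j : Nat) : Int), x)
          = (rows, some (d.insert (tags[j]) x)) := by
        simp only [pvStepA, hmod]
        have hj0 : (j : Int) ≠ 0 := by exact_mod_cast Nat.pos_iff_ne_zero.mp hj
        rw [if_neg hj0]
        simp [PySem.List.pyGetD_ofNat tags j "" hjlt]
      rw [hstep]
      have hdrop : tags.drop j = tags[j] :: tags.drop (j + 1) := List.drop_eq_getElem_cons hjlt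
      have hcast : ((tags.length * q + j : Nat) : Int) + 1 = ((tags.length * q + (j + 1) : Nat) : Int) := by push_cast; ring
      rw [hcast, ih (tags.length * q) (j + 1) ⟨q, rfl⟩ (by omega) (by simp at hjc ⊢; omega)]
      rw [hdrop, List.zip_cons_cons, List.foldl_cons]

-- A's loop over one whole chunk c (starting at a multiple of len(tags)): flush the pending dict, build the chunk's dict
theorem pvA_chunk (tags : List String) (ex : List (List String)) (ht : tags ≠ []) (c : List String)
    (hc : c ≠ []) (hlen : c.length ≤ tags.length) (s : Nat) (hdvd : tags.length ∣ s)
    (rows : List (List (String × String))) (dopt : Option (PySem.Dict String String)) :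
    (PySem.List.enumerate c ((s : Nat) : Int)).foldl (pvStepA tags ex) (rows, dopt)
      = (pvFlush ex rows dopt, some (PySem.Dict.ofList (tags.zip c))) := by
  obtain ⟨c0, ct, rfl⟩ := List.exists_cons_of_ne_nil hc
  obtain ⟨t0, tt, rfl⟩ := List.exists_cons_of_ne_nil ht
  obtain ⟨q, rfl⟩ := hdvd
  rw [PySem.List.enumerate_cons, List.foldl_cons]
  have hmod : PySem.Int.mod (((t0 :: tt).length * q : Nat) : Int) ((t0 :: tt).length : Int) = 0 := by
    rw [PySem.Int.mod_natCast]
    simp [Nat.mul_mod_right]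
  have hstep : pvStepA (t0 :: tt) ex (rows, dopt) ((((t0 :: tt).length * q : Nat) : Int), c0)
      = (pvFlush ex rows dopt, some (PySem.Dict.empty.insert t0 c0)) := by
    simp only [pvStepA, hmod]
    cases dopt with
    | none => simp [pvFlush]
    | some dd =>
        simp only [pvFlush]
        by_cases h : dd.items = [] <;> simp [h]
  rw [hstep]
  have hcast : (((t0 :: tt).length * q : Nat) : Int) + 1 = (((t0 :: tt).length * q + 1 : Nat) : Int) := by push_cast; ring
  rw [hcast, pvA_inner (t0 :: tt) ex ct ((t0 :: tt).length * q) 1 ⟨q, rfl⟩ (by omega) (by simp at hlen ⊢; omega)]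
  simp only [List.drop_one, List.tail_cons, List.zip_cons_cons]
  simp [PySem.Dict.ofList, PySem.Dict.update]

theorem pvSpecRows_congr (tags : List String) (ex : List (List String)) (ht : tags ≠ []) :
    ∀ (f g : Nat) (vs : List String), vs.length ≤ f → vs.length ≤ g →
      pvSpecRows tags ex f vs = pvSpecRows tags ex g vs := by
  intro f
  induction f with
  | zero =>
      intro g vs hf _
      have : vs = [] := by cases vs <;> simp_all
      subst this; cases g <;> rfl
  | succ f ih =>
      intro g vs hf hg
      cases vs with
      | nil => cases g <;> rfl
      | cons v vt =>
          cases g with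
          | zero => simp at hg
          | succ g =>
              have ht1 : 1 ≤ tags.length := by cases tags <;> simp_all
              simp only [pvSpecRows]
              congr 1
              simp only [List.length_cons] at hf hg
              exact ih g _ (by simp only [List.length_drop, List.length_cons]; omega)
                (by simp only [List.length_drop, List.length_cons]; omega)

-- A's whole loop (plus the final flush) produces the chunk rows, for any start that is a multiple of len(tags)
theorem pvA_main (tags : List String) (ex : List (List String)) (ht : tags ≠ []) :
    ∀ (L : Nat) (vs : List String), vs.length ≤ L → vs ≠ [] →
    ∀ (s : Nat), tags.length ∣ s →
    ∀ (rows : List (List (String × String))) (dopt : Option (PySem.Dict String String)),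
    (dopt = none ∨ ∃ dd, dopt = some dd ∧ dd.items ≠ []) →
    (let st := (PySem.List.enumerate vs ((s : Nat) : Int)).foldl (pvStepA tags ex) (rows, dopt)
     pvAddRow (st.2.getD PySem.Dict.empty) st.1 ex)
      = pvFlush ex rows dopt ++ pvSpecRows tags ex vs.length vs := by
  intro L
  induction L with
  | zero => intro vs hL hvs; exact absurd (List.eq_nil_of_length_eq_zero (Nat.le_zero.mp hL)) hvs
  | succ L ih =>
      intro vs hL hvs s hdvd rows dopt hd
      have ht1 : 1 ≤ tags.length := by cases tags <;> simp_all
      have hsplit : vs = vs.take tags.length ++ vs.drop tags.length := (List.take_append_drop _ _).symm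
      have hc : vs.take tags.length ≠ [] := by
        rw [ne_eq, List.take_eq_nil_iff, not_or]
        exact ⟨by omega, hvs⟩
      have hclen : (vs.take tags.length).length ≤ tags.length := by simp
      conv_lhs => rw [hsplit]
      rw [PySem.List.enumerate_append, List.foldl_append]
      rw [pvA_chunk tags ex ht _ hc hclen s hdvd rows dopt]
      have hne : (PySem.Dict.ofList (tags.zip (vs.take tags.length))).items ≠ [] :=
        pv_ofList_zip_ne_nil tags _ ht hc
      by_cases hr : vs.drop tags.length = []
      · rw [hr]
        simp only [PySem.List.enumerate, List.foldl_nil]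
        obtain ⟨v, vt, rfl⟩ := List.exists_cons_of_ne_nil hvs
        have hlen1 : (v :: vt).length = vt.length + 1 := by simp
        rw [hlen1]
        simp only [pvSpecRows, hr, pvAddRow_eq]
        simp [pvFlush, pvAddRow_eq]
      · have hlen2 : (vs.drop tags.length).length ≤ L := by
          have h1 : 0 < vs.length := List.length_pos_of_ne_nil hvs
          simp only [List.length_drop]
          omega
        have hslen : (vs.take tags.length).length = tags.length := by
          simp only [List.length_take]
          rcases Nat.lt_or_ge vs.length tags.length with h | h
          · exfalso; exact hr (List.drop_eq_nil_of_le (by omega))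
          · omega
        have hcast2 : ((s : Nat) : Int) + ((vs.take tags.length).length : Int) = ((s + tags.length : Nat) : Int) := by
          rw [hslen]; push_cast; ring
        rw [hcast2]
        rw [ih _ hlen2 hr (s + tags.length) (dvd_add hdvd dvd_rfl) _ _
          (Or.inr ⟨_, rfl, hne⟩)]
        obtain ⟨v, vt, rfl⟩ := List.exists_cons_of_ne_nil hvs
        have hlen1 : (v :: vt).length = vt.length + 1 := by simp
        rw [hlen1]
        simp only [pvSpecRows]
        rw [pvSpecRows_congr tags ex ht vt.length ((v :: vt).drop tags.length).length _ (by simp; omega) (le_refl _)]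
        simp only [pvFlush, hne, ne_eq, not_false_iff, if_pos, pvAddRow_eq]
        simp

-- pyRange with positive step: nil and cons forms
theorem pv_pyRange_pos_nil (a b s : Int) (hs : 0 < s) (h : b ≤ a) :
    PySem.List.pyRange a b s = [] := by
  rw [PySem.List.pyRange_of_pos a b hs, if_neg (by omega)]
  simp

theorem pv_pyRange_pos_cons (a b s : Int) (hs : 0 < s) (h : a < b) :
    PySem.List.pyRange a b s = a :: PySem.List.pyRange (a + s) b s := by
  rw [PySem.List.pyRange_of_pos a b hs, PySem.List.pyRange_of_pos (a + s) b hs]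
  by_cases h2 : a + s < b
  · rw [if_pos h, if_pos h2]
    have heq : (b - a + s - 1) / s = (b - (a + s) + s - 1) / s + 1 := by
      have h3 : b - (a + s) + s - 1 + 1 * s = b - a + s - 1 := by ring
      rw [← h3, Int.add_mul_ediv_right _ _ (by omega)]
    rw [heq]
    have hnn : 0 ≤ (b - (a + s) + s - 1) / s := Int.ediv_nonneg (by omega) (by omega)
    rw [Int.toNat_add hnn (by norm_num), Int.toNat_one, List.range_succ_eq_map]
    simp only [List.map_cons, List.map_map, Nat.cast_zero]
    congr 1
    · ring
    · apply List.map_congr_left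
      intro k _
      simp only [Function.comp_apply]
      push_cast
      ring
  · rw [if_pos h, if_neg h2]
    have hone : (b - a + s - 1) / s = 1 := by
      nlinarith [Int.mul_ediv_add_emod (b - a + s - 1) s, Int.emod_lt_of_pos (b - a + s - 1) hs,
        Int.emod_nonneg (b - a + s - 1) (by omega : s ≠ 0)]
    rw [hone]
    simp

-- one step of B's loop, at a start index lying right after the consumed prefix
theorem pvStepB_prefix (tags : List String) (ex : List (List String)) (pre vs : List String)
    (rows : List (List (String × String))) :
    pvStepB tags (pre ++ vs) ex rows ((pre.length : Nat) : Int)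
      = rows ++ (let d := PySem.Dict.ofList (tags.zip (vs.take tags.length))
          if ex.any (fun e => d.get? (e.getD 0 "") = some (e.getD 1 "")) then [] else [d.items]) := by
  unfold pvStepB
  rw [PySem.List.slice_natCast_add (pre ++ vs) pre.length tags.length, List.drop_left]
  dsimp only
  split <;> simp

-- B's loop over the remaining chunks, with pre the already-consumed prefix
theorem pvB_main (tags : List String) (ex : List (List String)) (ht : tags ≠ []) :
    ∀ (L : Nat) (vs pre : List String), vs.length ≤ L →
    ∀ (rows : List (List (String × String))),
    (PySem.List.pyRange ((pre.length : Nat) : Int) ((pre.length + vs.length : Nat) : Int) ((tags.length : Nat) : Int)).foldl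
        (pvStepB tags (pre ++ vs) ex) rows
      = rows ++ pvSpecRows tags ex vs.length vs := by
  have ht1 : 1 ≤ tags.length := by cases tags <;> simp_all
  have hspos : (0 : Int) < (tags.length : Int) := by exact_mod_cast ht1
  intro L
  induction L with
  | zero =>
      intro vs pre hL rows
      have hv : vs = [] := by cases vs <;> simp_all
      subst hv
      rw [pv_pyRange_pos_nil _ _ _ hspos (by simp)]
      simp [pvSpecRows_nil]
  | succ L ih =>
      intro vs pre hL rows
      by_cases hv : vs = []
      · subst hv
        rw [pv_pyRange_pos_nil _ _ _ hspos (by simp)]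
        simp [pvSpecRows_nil]
      · have hv1 : 1 ≤ vs.length := by cases vs <;> simp_all
        rw [pv_pyRange_pos_cons _ _ _ hspos (by push_cast; omega), List.foldl_cons,
          pvStepB_prefix tags ex pre vs rows]
        by_cases hr : vs.drop tags.length = []
        · have hle : vs.length ≤ tags.length := by
            rw [List.drop_eq_nil_iff] at hr; exact hr
          rw [pv_pyRange_pos_nil _ _ _ hspos (by push_cast; omega)]
          obtain ⟨v, vt, rfl⟩ := List.exists_cons_of_ne_nil hv
          simp [pvSpecRows, hr, pvSpecRows_nil]
        · have hnle : tags.length < vs.length := by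
            by_contra hcon
            exact hr (List.drop_eq_nil_of_le (by omega))
          have hpre' : ((pre ++ vs.take tags.length).length : Nat) = pre.length + tags.length := by
            simp
            omega
          have hc1 : ((pre.length : Nat) : Int) + ((tags.length : Nat) : Int)
              = (((pre ++ vs.take tags.length).length : Nat) : Int) := by
            rw [hpre']; push_cast; ring
          have hc2 : ((pre.length + vs.length : Nat) : Int)
              = (((pre ++ vs.take tags.length).length + (vs.drop tags.length).length : Nat) : Int) := by
            rw [hpre']; simp only [List.length_drop]; push_cast; omega
          have happ : pre ++ vs = (pre ++ vs.take tags.length) ++ vs.drop tags.length := by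
            rw [List.append_assoc, List.take_append_drop]
          rw [hc1, hc2, happ,
          ih (vs.drop tags.length) (pre ++ vs.take tags.length)
            (by simp only [List.length_drop]; omega) _]
        
          obtain ⟨v, vt, rfl⟩ := List.exists_cons_of_ne_nil hv
          simp only [List.length_cons, pvSpecRows]
          rw [pvSpecRows_congr tags ex ht vt.length ((v :: vt).drop tags.length).length _
            (by simp only [List.length_drop, List.length_cons]; omega) (le_refl _)]
          simp


-- ===== VERDICT (by name: the statement is the Claim_ definition above) =====
theorem collect_entity_values_spec : Claim_equal_collect_entity_values := by
  intro tags values ex _ hpre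
  unfold Spec_collect_entity_values
  by_cases hv : values = []
  · simp [collect_entity_values, collect_entity_values_alt, hv]
  · have ht : tags ≠ [] := by
      rcases hpre with h | ⟨h, _⟩
      · exact absurd h hv
      · exact h
    have hA := pvA_main tags ex ht values.length values (le_refl _) hv 0 ⟨0, by ring⟩ [] none (Or.inl rfl)
    have hB := pvB_main tags ex ht values.length values [] (le_refl _) []
    simp only [collect_entity_values, collect_entity_values_alt, if_neg hv]
    simp only [List.length_nil, Nat.cast_zero, List.nil_append, Nat.zero_add] at hA hB
    rw [hB]
    simp only [pvFlush, List.nil_append] at hA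
    exact hA
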